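-- pv_equiv track=rewrite | github.com/man-group/hiveminder | algos/winner.py | find_largest_space
-- ===== SOURCE A (Python) =====
-- def find_largest_space(h_ls):
--     occupied = h_ls + [[i, j] for i in [-1, 8] for j in range(-1,9)] + [[i, j] for i in range(-1,9) for j in [-1, 8]]
--     tiles = {10*i+j: (1 if [i, j] not in occupied else 0) for i in range(-1, 9) for j in range(-1, 9)}
--     queue1 = [t for t in tiles if tiles[t]]
--     largest = 0
--     while queue1:
--         start_tile = queue1.pop(0)
--         if tiles[start_tile]:
--             size = 0
--             queue2 = [start_tile]
--             while queue2:
--                 tile = queue2.pop(0)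
--                 if not tiles[tile]:
--                     continue
--                 tiles[tile] = 0
--                 size += 1
--                 i, j = tile // 10, tile % 10
--                 if tiles[10*i + j+1]:
--                     queue2.append(10*i + j+1)
--                 if tiles[10*i + j-1]:
--                     queue2.append(10*i + j-1)
--                 if tiles[10*(i+1) + j]:
--                     queue2.append(10*(i+1) + j)
--                 if tiles[10*(i-1) + j]:
--                     queue2.append(10*(i-1) + j)
--                 if i%2:
--                     if tiles[10*(i-1) + j-1]:
--                         queue2.append(10*(i-1) + j-1)
--                     if tiles[10*(i+1) + j-1]:
--                         queue2.append(10*(i+1) + j-1)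
--                 else:
--                     if tiles[10*(i-1) + j+1]:
--                         queue2.append(10*(i-1) + j+1)
--                     if tiles[10*(i+1) + j+1]:
--                         queue2.append(10*(i+1) + j+1)
--             largest = max(largest, size)
--     return largest
-- ===== SOURCE B (Python) =====
-- def _neighbours(t):
--     i, j = t // 10, t % 10
--     out = [10*i + j+1, 10*i + j-1, 10*(i+1) + j, 10*(i-1) + j]
--     if i % 2:
--         out += [10*(i-1) + j-1, 10*(i+1) + j-1]
--     else:
--         out += [10*(i-1) + j+1, 10*(i+1) + j+1]
--     return out
--
--
-- def find_largest_space(h_ls):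
--     free = {10*i + j for i in range(8) for j in range(8) if [i, j] not in h_ls}
--     largest = 0
--     for t in free:
--         comp = {t}
--         for _ in range(len(free)):
--             grown = comp | ({n for c in comp for n in _neighbours(c)} & free)
--             if grown == comp:
--                 break
--             comp = grown
--         largest = max(largest, len(comp))
--     return largest
-- ===== Notes on version B (the rewrite author's own statement) =====
-- stated objective: simpler
-- what changed: A builds a 100-key 0/1 dict over the bordered grid and runs a destructive two-level BFS with explicit queues; B builds just the set of free interior cells and, for each free cell, grows its connected component by set-union saturation (repeated neighbourhood expansion to a fixed point), taking the maximum component size.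
import Mathlib
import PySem

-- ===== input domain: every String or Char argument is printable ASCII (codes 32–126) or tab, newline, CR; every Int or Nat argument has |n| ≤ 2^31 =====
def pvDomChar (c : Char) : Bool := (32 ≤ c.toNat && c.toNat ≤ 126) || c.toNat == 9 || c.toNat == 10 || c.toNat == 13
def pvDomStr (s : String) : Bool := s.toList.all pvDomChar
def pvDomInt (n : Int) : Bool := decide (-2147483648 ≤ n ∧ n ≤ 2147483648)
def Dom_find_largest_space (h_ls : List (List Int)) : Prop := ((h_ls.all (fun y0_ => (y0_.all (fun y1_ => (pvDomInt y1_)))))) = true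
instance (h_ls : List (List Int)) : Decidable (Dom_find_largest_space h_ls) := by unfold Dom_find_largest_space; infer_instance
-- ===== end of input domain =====

-- B replaces A's destructive two-queue BFS over a 100-key 0/1 dict by per-cell
-- fixed-point saturation of neighbourhoods over the set of free interior cells (simpler decomposition).


-- ===== PORT A =====
-- A-side helpers: the two while loops as recursions (bfsA takes a fuel argument that only
-- makes the recursion structural; the Python loop always terminates well within it).
-- Python's `tiles[k]` lookups are ported as `getD k 0`: every key looked up is present
-- (all looked-up keys lie in the -1..8 bordered grid), so the default is never consulted.
def bfsA : Nat → PySem.Dict Int Int → List Int → Int → PySem.Dict Int Int × Int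
  | 0, tiles, _, size => (tiles, size)
  | _ + 1, tiles, [], size => (tiles, size)
  | fuel + 1, tiles, tile :: queue2, size =>
      if tiles.getD tile 0 = 0 then bfsA fuel tiles queue2 size
      else
        let tiles := tiles.insert tile 0
        let size := size + 1
        let i := PySem.Int.floordiv tile 10
        let j := PySem.Int.mod tile 10
        let queue2 := if tiles.getD (10*i + (j+1)) 0 ≠ 0 then queue2 ++ [10*i + (j+1)] else queue2
        let queue2 := if tiles.getD (10*i + (j-1)) 0 ≠ 0 then queue2 ++ [10*i + (j-1)] else queue2
        let queue2 := if tiles.getD (10*(i+1) + j) 0 ≠ 0 then queue2 ++ [10*(i+1) + j] else queue2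
        let queue2 := if tiles.getD (10*(i-1) + j) 0 ≠ 0 then queue2 ++ [10*(i-1) + j] else queue2
        let queue2 :=
          if PySem.Int.mod i 2 ≠ 0 then
            let queue2 := if tiles.getD (10*(i-1) + (j-1)) 0 ≠ 0 then queue2 ++ [10*(i-1) + (j-1)] else queue2
            if tiles.getD (10*(i+1) + (j-1)) 0 ≠ 0 then queue2 ++ [10*(i+1) + (j-1)] else queue2
          else
            let queue2 := if tiles.getD (10*(i-1) + (j+1)) 0 ≠ 0 then queue2 ++ [10*(i-1) + (j+1)] else queue2
            if tiles.getD (10*(i+1) + (j+1)) 0 ≠ 0 then queue2 ++ [10*(i+1) + (j+1)] else queue2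
        bfsA fuel tiles queue2 size

def outerA : PySem.Dict Int Int → List Int → Int → Int
  | _, [], largest => largest
  | tiles, t :: q, largest =>
      if tiles.getD t 0 ≠ 0 then
        let r := bfsA 2000 tiles [t] 0
        outerA r.1 q (max largest r.2)
      else outerA tiles q largest

def find_largest_space (h_ls : List (List Int)) : Int :=
  let occupied : List (List Int) :=
    h_ls ++ ([(-1 : Int), 8].flatMap (fun i => (PySem.List.pyRange (-1) 9 1).map (fun j => [i, j])))
         ++ ((PySem.List.pyRange (-1) 9 1).flatMap (fun i => [(-1 : Int), 8].map (fun j => [i, j])))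
  let tiles : PySem.Dict Int Int :=
    ((PySem.List.pyRange (-1) 9 1).flatMap (fun i => (PySem.List.pyRange (-1) 9 1).map (fun j => (i, j)))).foldl
      (fun d p => d.insert (10 * p.1 + p.2) (if [p.1, p.2] ∈ occupied then 0 else 1)) PySem.Dict.empty
  let queue1 : List Int := tiles.keys.filter (fun t => decide (tiles.getD t 0 ≠ 0))
  outerA tiles queue1 0

-- ===== PORT B =====
-- B-side helpers
def nbrsB (t : Int) : List Int :=
  let i := PySem.Int.floordiv t 10
  let j := PySem.Int.mod t 10
  [10*i + (j+1), 10*i + (j-1), 10*(i+1) + j, 10*(i-1) + j] ++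
    (if PySem.Int.mod i 2 ≠ 0 then [10*(i-1) + (j-1), 10*(i+1) + (j-1)]
     else [10*(i-1) + (j+1), 10*(i+1) + (j+1)])

def growB (free comp : PySem.Set Int) : PySem.Set Int :=
  PySem.Set.union comp (PySem.Set.inter (PySem.Set.ofList (comp.flatMap nbrsB)) free)

def loopB (free : PySem.Set Int) : Nat → PySem.Set Int → PySem.Set Int
  | 0, comp => comp
  | k + 1, comp =>
      let grown := growB free comp
      if PySem.Set.equal grown comp then comp else loopB free k grown

def find_largest_space_alt (h_ls : List (List Int)) : Int :=
  let free : PySem.Set Int :=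
    PySem.Set.ofList
      ((PySem.List.pyRange 0 8 1).flatMap (fun i =>
        ((PySem.List.pyRange 0 8 1).filter (fun j => decide ([i, j] ∉ h_ls))).map (fun j => 10*i + j)))
  free.foldl (fun largest t => max largest (PySem.Set.len (loopB free free.length (PySem.Set.ofList [t])))) 0

-- ===== PRECONDITION & SPEC =====
def Spec_find_largest_space (h_ls : List (List Int)) (out : Int) : Prop := out = find_largest_space_alt h_ls
instance (h_ls : List (List Int)) (out : Int) : Decidable (Spec_find_largest_space h_ls out) := by unfold Spec_find_largest_space; infer_instance

-- ===== CLAIM (what is proved, stated in full; the proofs are below) =====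
def Claim_equal_find_largest_space : Prop := ∀ (h_ls : List (List Int)), Dom_find_largest_space h_ls → Spec_find_largest_space h_ls (find_largest_space h_ls)

-- ===== LEMMAS AND PROOFS =====

-- ---- graph layer: interior cells, reachability, saturation ----

def interiorL : List Int := (List.range 8).flatMap (fun i => (List.range 8).map (fun j => ((10*i + j : Nat) : Int)))

def stepR (T : Finset Int) (a b : Int) : Prop := a ∈ T ∧ b ∈ T ∧ b ∈ nbrsB a

def Reach (T : Finset Int) (s u : Int) : Prop := Relation.ReflTransGen (stepR T) s u

def expandF (T C : Finset Int) : Finset Int := C ∪ C.biUnion (fun c => (nbrsB c).toFinset ∩ T)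

def compF (T : Finset Int) (s : Int) : Finset Int := (expandF T)^[T.card] {s}

def Rset (T : Finset Int) (q : List Int) : Finset Int :=
  q.foldr (fun s acc => if s ∈ T then compF T s ∪ acc else acc) ∅

lemma nbrs_symm : ∀ t ∈ interiorL, ∀ u ∈ interiorL, (u ∈ nbrsB t ↔ t ∈ nbrsB u) := by
  have h : interiorL.all (fun t => interiorL.all (fun u => (u ∈ nbrsB t) == (t ∈ nbrsB u))) = true := by decide
  intro t ht u hu
  have h1 := (List.all_eq_true.mp h) t ht
  have h2 := (List.all_eq_true.mp h1) u hu
  have := beq_iff_eq.mp h2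
  constructor <;> intro hx <;> simp_all

lemma nbrsB_length (t : Int) : (nbrsB t).length = 6 := by
  simp only [nbrsB, List.length_append]
  split <;> rfl

lemma stepR_symm (T : Finset Int) (hT : ∀ x ∈ T, x ∈ interiorL) :
    ∀ {a b}, stepR T a b → stepR T b a := by
  rintro a b ⟨ha, hb, hn⟩
  exact ⟨hb, ha, (nbrs_symm a (hT a ha) b (hT b hb)).mp hn⟩

lemma reach_symm (T : Finset Int) (hT : ∀ x ∈ T, x ∈ interiorL) {s u : Int}
    (h : Reach T s u) : Reach T u s :=
  Relation.ReflTransGen.symmetric (fun _ _ hab => stepR_symm T hT hab) h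

lemma reach_mem_right (T : Finset Int) {s u : Int} (hs : s ∈ T) (h : Reach T s u) : u ∈ T := by
  induction h with
  | refl => exact hs
  | tail _ hstep _ => exact hstep.2.1

lemma reach_mono {T' T : Finset Int} (hsub : T' ⊆ T) {s u : Int} (h : Reach T' s u) :
    Reach T s u := by
  induction h with
  | refl => exact Relation.ReflTransGen.refl
  | tail _ hstep ih => exact ih.tail ⟨hsub hstep.1, hsub hstep.2.1, hstep.2.2⟩

lemma reach_last_exit (T : Finset Int) (t u : Int) (h : Reach T t u) :
    u = t ∨ ∃ n, n ∈ nbrsB t ∧ n ∈ T.erase t ∧ Reach (T.erase t) n u := by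
  induction h with
  | refl => exact Or.inl rfl
  | @tail v u hr hstep ih =>
      by_cases hu : u = t
      · exact Or.inl hu
      rcases ih with hv | ⟨n, hn1, hn2, hnr⟩
      · subst hv
        exact Or.inr ⟨u, hstep.2.2, Finset.mem_erase.mpr ⟨hu, hstep.2.1⟩,
          Relation.ReflTransGen.refl⟩
      · have hvT' : v ∈ T.erase t := reach_mem_right (T.erase t) hn2 hnr
        have hvt : v ≠ t := (Finset.mem_erase.mp hvT').1
        exact Or.inr ⟨n, hn1, hn2, hnr.tail
          ⟨hvT', Finset.mem_erase.mpr ⟨hu, hstep.2.1⟩, hstep.2.2⟩⟩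

lemma reach_or_through (T : Finset Int) (t s u : Int) (h : Reach T s u) :
    Reach (T.erase t) s u ∨ Reach T t u := by
  induction h with
  | refl => exact Or.inl Relation.ReflTransGen.refl
  | @tail v u hr hstep ih =>
      rcases ih with hv | hvt
      · by_cases hu : u = t
        · subst hu; exact Or.inr Relation.ReflTransGen.refl
        by_cases hvt : v = t
        · subst hvt; exact Or.inr (Relation.ReflTransGen.single hstep)
        · exact Or.inl (hv.tail ⟨Finset.mem_erase.mpr ⟨hvt, hstep.1⟩,
            Finset.mem_erase.mpr ⟨hu, hstep.2.1⟩, hstep.2.2⟩)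
      · exact Or.inr (hvt.tail hstep)

lemma subset_expandF (T C : Finset Int) : C ⊆ expandF T C := Finset.subset_union_left

lemma expandF_subset (T C : Finset Int) : expandF T C ⊆ C ∪ T := by
  intro x hx
  rcases Finset.mem_union.mp hx with h | h
  · exact Finset.mem_union_left _ h
  · rcases Finset.mem_biUnion.mp h with ⟨c, _, hc⟩
    exact Finset.mem_union_right _ (Finset.mem_inter.mp hc).2

lemma iterate_subset (T : Finset Int) (s : Int) (k : Nat) :
    (expandF T)^[k] {s} ⊆ insert s T := by
  induction k with
  | zero => simp
  | succ k ih =>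
      rw [Function.iterate_succ_apply']
      intro x hx
      rcases Finset.mem_union.mp (expandF_subset T _ hx) with h | h
      · exact ih h
      · exact Finset.mem_insert_of_mem h

lemma subset_iterate (T : Finset Int) (s : Int) (k : Nat) :
    ({s} : Finset Int) ⊆ (expandF T)^[k] {s} := by
  induction k with
  | zero => simp
  | succ k ih =>
      rw [Function.iterate_succ_apply']
      exact ih.trans (subset_expandF T _)

lemma iterate_stable_of_stable (T : Finset Int) {X : Finset Int}
    (h : expandF T X = X) (k : Nat) : (expandF T)^[k] X = X := by
  induction k with
  | zero => rfl
  | succ k ih => rw [Function.iterate_succ_apply', ih, h]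

lemma iter_card (T : Finset Int) {s : Int} (_hs : s ∈ T) :
    ∀ k : Nat, expandF T ((expandF T)^[k] {s}) = (expandF T)^[k] {s} ∨
      k + 1 ≤ ((expandF T)^[k] {s}).card := by
  intro k
  induction k with
  | zero => simp
  | succ k ih =>
      rcases ih with hst | hc
      · left
        rw [Function.iterate_succ_apply', hst, hst]
      · by_cases hst : expandF T ((expandF T)^[k+1] {s}) = (expandF T)^[k+1] {s}
        · exact Or.inl hst
        · right
          rw [Function.iterate_succ_apply']
          have hsub : (expandF T)^[k] {s} ⊆ expandF T ((expandF T)^[k] {s}) :=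
            subset_expandF T _
          have hne : (expandF T)^[k] {s} ≠ expandF T ((expandF T)^[k] {s}) := by
            intro h
            apply hst
            have h1 : (expandF T)^[k+1] {s} = (expandF T)^[k] {s} := by
              rw [Function.iterate_succ_apply', ← h]
            rw [h1, ← h]
          have := Finset.card_lt_card (Finset.ssubset_iff_subset_ne.mpr ⟨hsub, hne⟩)
          omega

lemma compF_stable (T : Finset Int) {s : Int} (hs : s ∈ T) :
    expandF T (compF T s) = compF T s := by
  rcases iter_card T hs T.card with h | h
  · exact h
  · exfalso
    have hsub : (expandF T)^[T.card] {s} ⊆ T := by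
      intro x hx
      rcases Finset.mem_insert.mp (iterate_subset T s T.card hx) with rfl | hxT
      · exact hs
      · exact hxT
    have := Finset.card_le_card hsub
    omega

lemma iterate_ge_card (T : Finset Int) {s : Int} (hs : s ∈ T) {m : Nat}
    (hm : T.card ≤ m) : (expandF T)^[m] {s} = compF T s := by
  have : m = T.card + (m - T.card) := by omega
  rw [this, Nat.add_comm, Function.iterate_add_apply]
  exact iterate_stable_of_stable T (compF_stable T hs) _

lemma mem_iterate_reach (T : Finset Int) {s : Int} (hs : s ∈ T) (k : Nat) {u : Int}
    (h : u ∈ (expandF T)^[k] {s}) : Reach T s u := by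
  induction k generalizing u with
  | zero =>
      simp only [Function.iterate_zero, id_eq, Finset.mem_singleton] at h
      subst h; exact Relation.ReflTransGen.refl
  | succ k ih =>
      rw [Function.iterate_succ_apply'] at h
      rcases Finset.mem_union.mp h with h | h
      · exact ih h
      · rcases Finset.mem_biUnion.mp h with ⟨c, hc, hu⟩
        rcases Finset.mem_inter.mp hu with ⟨hun, huT⟩
        exact (ih hc).tail ⟨reach_mem_right T hs (ih hc), huT, List.mem_toFinset.mp hun⟩

lemma stable_char (T : Finset Int) {t : Int} (ht : t ∈ T) {X : Finset Int} {m : Nat}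
    (hX : X = (expandF T)^[m] {t}) (hst : expandF T X = X) :
    ∀ u, u ∈ X ↔ Reach T t u := by
  intro u
  constructor
  · intro hu
    exact mem_iterate_reach T ht m (hX ▸ hu)
  · intro hr
    induction hr with
    | refl => exact hX ▸ subset_iterate T t m (Finset.mem_singleton_self t)
    | @tail v u hr hstep ih =>
        rw [← hst]
        exact Finset.mem_union_right _ (Finset.mem_biUnion.mpr
          ⟨v, ih, Finset.mem_inter.mpr ⟨List.mem_toFinset.mpr hstep.2.2, hstep.2.1⟩⟩)

lemma mem_compF (T : Finset Int) {t : Int} (ht : t ∈ T) (u : Int) :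
    u ∈ compF T t ↔ Reach T t u :=
  stable_char T ht rfl (compF_stable T ht) u

lemma compF_subset_T (T : Finset Int) {t : Int} (ht : t ∈ T) : compF T t ⊆ T := by
  intro u hu
  exact reach_mem_right T ht ((mem_compF T ht u).mp hu)

lemma mem_Rset (T : Finset Int) (q : List Int) (u : Int) :
    u ∈ Rset T q ↔ ∃ s ∈ q, s ∈ T ∧ u ∈ compF T s := by
  induction q with
  | nil => simp [Rset]
  | cons a q ih =>
      show u ∈ (if a ∈ T then compF T a ∪ Rset T q else Rset T q) ↔ _
      by_cases ha : a ∈ T <;> simp [ha, ih]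

lemma Rset_subset (T : Finset Int) (q : List Int) : Rset T q ⊆ T := by
  intro u hu
  rcases (mem_Rset T q u).mp hu with ⟨s, _, hsT, hu⟩
  exact compF_subset_T T hsT hu

lemma Rset_skip (T : Finset Int) {t : Int} (ht : t ∉ T) (q : List Int) :
    Rset T (t :: q) = Rset T q := by
  simp [Rset, ht]

lemma Rset_step (T : Finset Int) (hT : ∀ x ∈ T, x ∈ interiorL) {t : Int} (ht : t ∈ T)
    (q : List Int) :
    Rset T (t :: q) =
      insert t (Rset (T.erase t) (q ++ (nbrsB t).filter (fun n => decide (n ∈ T.erase t)))) := by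
  have hT' : ∀ x ∈ T.erase t, x ∈ interiorL := fun x hx => hT x (Finset.erase_subset t T hx)
  ext u
  simp only [mem_Rset, Finset.mem_insert, List.mem_cons, List.mem_append, List.mem_filter,
    decide_eq_true_eq]
  constructor
  · rintro ⟨s, hsq, hsT, hu⟩
    have hr : Reach T s u := (mem_compF T hsT u).mp hu
    by_cases hst : s = t
    · subst hst
      rcases reach_last_exit T s u hr with h | ⟨n, hn1, hn2, hnr⟩
      · exact Or.inl h
      · exact Or.inr ⟨n, Or.inr ⟨hn1, hn2⟩, hn2, (mem_compF _ hn2 u).mpr hnr⟩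
    · rcases hsq with h | hsq
      · exact absurd h hst
      rcases reach_or_through T t s u hr with h | h
      · exact Or.inr ⟨s, Or.inl hsq, Finset.mem_erase.mpr ⟨hst, hsT⟩,
          (mem_compF _ (Finset.mem_erase.mpr ⟨hst, hsT⟩) u).mpr h⟩
      · rcases reach_last_exit T t u h with h' | ⟨n, hn1, hn2, hnr⟩
        · exact Or.inl h'
        · exact Or.inr ⟨n, Or.inr ⟨hn1, hn2⟩, hn2, (mem_compF _ hn2 u).mpr hnr⟩
  · rintro (rfl | ⟨s, hsL, hsT', hu⟩)
    · exact ⟨u, Or.inl rfl, ht, (mem_compF T ht u).mpr Relation.ReflTransGen.refl⟩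
    have hr' : Reach (T.erase t) s u := (mem_compF _ hsT' u).mp hu
    have hsT : s ∈ T := Finset.mem_of_mem_erase hsT'
    rcases hsL with hsq | ⟨hn1, _⟩
    · exact ⟨s, Or.inr hsq, hsT,
        (mem_compF T hsT u).mpr (reach_mono (Finset.erase_subset t T) hr')⟩
    · have : Reach T t u :=
        (Relation.ReflTransGen.single ⟨ht, hsT, hn1⟩).trans
          (reach_mono (Finset.erase_subset t T) hr')
      exact ⟨t, Or.inl rfl, ht, (mem_compF T ht u).mpr this⟩

-- ---- A-side: bfs worklist lemma and outer loop ----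

set_option maxHeartbeats 1000000 in
lemma bfsA_step (fuel : Nat) (tiles : PySem.Dict Int Int) (tile : Int) (q : List Int)
    (size : Int) (h : ¬ tiles.getD tile 0 = 0) :
    bfsA (fuel+1) tiles (tile :: q) size =
      bfsA fuel (tiles.insert tile 0)
        (q ++ (nbrsB tile).filter (fun n => decide ((tiles.insert tile 0).getD n 0 ≠ 0)))
        (size + 1) := by
  conv_lhs => rw [bfsA]
  rw [if_neg h]
  simp only [nbrsB]
  split_ifs <;>
    simp only [List.filter_cons, List.filter_nil, decide_eq_true_eq, ne_eq, *, ite_true,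
      ite_false, not_false_eq_true, List.append_nil, List.cons_append, List.nil_append,
      List.append_assoc]

lemma bfs_spec : ∀ (fuel : Nat) (tiles : PySem.Dict Int Int) (T : Finset Int) (q : List Int) (size : Int),
    (∀ k, tiles.getD k 0 ≠ 0 ↔ k ∈ T) → (∀ x ∈ T, x ∈ interiorL) →
    7 * T.card + q.length ≤ fuel →
    (bfsA fuel tiles q size).2 = size + ((Rset T q).card : Int) ∧
    (∀ k, (bfsA fuel tiles q size).1.getD k 0 ≠ 0 ↔ k ∈ T \ Rset T q) := by
  intro fuel
  induction fuel with
  | zero =>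
      intro tiles T q size hrel _ hfuel
      have hq : q = [] := List.length_eq_zero_iff.mp (by omega)
      subst hq
      refine ⟨by simp [bfsA, Rset], fun k => by simpa [bfsA, Rset] using hrel k⟩
  | succ fuel ih =>
      intro tiles T q size hrel hint hfuel
      cases q with
      | nil =>
          refine ⟨by simp [bfsA, Rset], fun k => by simpa [bfsA, Rset] using hrel k⟩
      | cons t q =>
          by_cases ht0 : tiles.getD t 0 = 0
          · have htT : t ∉ T := fun hm => ((hrel t).mpr hm) ht0
            rw [show bfsA (fuel+1) tiles (t::q) size = bfsA fuel tiles q size from by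
              rw [bfsA]; rw [if_pos ht0]]
            rw [Rset_skip T htT]
            exact ih tiles T q size hrel hint (by simp at hfuel ⊢; omega)
          · have htT : t ∈ T := (hrel t).mp ht0
            rw [bfsA_step fuel tiles t q size ht0]
            have hrel' : ∀ k, (tiles.insert t 0).getD k 0 ≠ 0 ↔ k ∈ T.erase t := by
              intro k
              rw [PySem.Dict.getD_insert]
              by_cases hk : k = t <;> simp [hk, hrel k, Finset.mem_erase]
            have hfilter : (nbrsB t).filter (fun n => decide ((tiles.insert t 0).getD n 0 ≠ 0))
                = (nbrsB t).filter (fun n => decide (n ∈ T.erase t)) := by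
              apply List.filter_congr; intro n _; simp [hrel' n]
            rw [hfilter]
            have hint' : ∀ x ∈ T.erase t, x ∈ interiorL :=
              fun x hx => hint x (Finset.erase_subset _ _ hx)
            have hcard : (T.erase t).card = T.card - 1 := Finset.card_erase_of_mem htT
            have hpos : 1 ≤ T.card := Finset.card_pos.mpr ⟨t, htT⟩
            have hlen : ((nbrsB t).filter (fun n => decide (n ∈ T.erase t))).length ≤ 6 :=
              le_trans (List.length_filter_le _ _) (le_of_eq (nbrsB_length t))
            obtain ⟨h1, h2⟩ := ih (tiles.insert t 0) (T.erase t)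
              (q ++ (nbrsB t).filter (fun n => decide (n ∈ T.erase t))) (size + 1)
              hrel' hint' (by
                rw [List.length_append]
                simp only [List.length_cons] at hfuel
                omega)
            have htnot : t ∉ Rset (T.erase t) (q ++ (nbrsB t).filter (fun n => decide (n ∈ T.erase t))) :=
              fun hmem => (Finset.mem_erase.mp (Rset_subset _ _ hmem)).1 rfl
            constructor
            · rw [h1, Rset_step T hint htT q, Finset.card_insert_of_notMem htnot]
              push_cast; ring
            · intro k
              rw [h2 k, Rset_step T hint htT q]
              simp only [Finset.mem_sdiff, Finset.mem_insert, Finset.mem_erase]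
              constructor
              · rintro ⟨⟨hkt, hkT⟩, hkR⟩
                exact ⟨hkT, fun h => h.elim hkt hkR⟩
              · rintro ⟨hkT, hkR⟩
                refine ⟨⟨fun h => hkR (Or.inl h), hkT⟩, fun h => hkR (Or.inr h)⟩

lemma reach_avoid (T : Finset Int) (hT : ∀ x ∈ T, x ∈ interiorL) {t : Int} (ht : t ∈ T)
    {s : Int} (hns : ¬ Reach T t s) {u : Int} (h : Reach T s u) :
    Reach (T \ compF T t) s u := by
  induction h with
  | refl => exact Relation.ReflTransGen.refl
  | @tail v u hr hstep ih =>
      have hvn : v ∉ compF T t := by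
        intro hv
        exact hns (((mem_compF T ht v).mp hv).trans (reach_symm T hT hr))
      have hun : u ∉ compF T t := by
        intro hu
        exact hns (((mem_compF T ht u).mp hu).trans (reach_symm T hT (hr.tail hstep)))
      exact ih.tail ⟨Finset.mem_sdiff.mpr ⟨hstep.1, hvn⟩,
        Finset.mem_sdiff.mpr ⟨hstep.2.1, hun⟩, hstep.2.2⟩

lemma comp_sdiff_eq (T : Finset Int) (hT : ∀ x ∈ T, x ∈ interiorL) {t : Int} (ht : t ∈ T)
    {s : Int} (hs : s ∈ T \ compF T t) : compF (T \ compF T t) s = compF T s := by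
  rcases Finset.mem_sdiff.mp hs with ⟨hsT, hsn⟩
  have hns : ¬ Reach T t s := fun h => hsn ((mem_compF T ht s).mpr h)
  ext u
  rw [mem_compF _ hs u, mem_compF T hsT u]
  constructor
  · exact reach_mono Finset.sdiff_subset
  · exact reach_avoid T hT ht hns

lemma comp_eq_of_mem (T : Finset Int) (hT : ∀ x ∈ T, x ∈ interiorL) {t s : Int} (ht : t ∈ T)
    (hs : s ∈ compF T t) : compF T s = compF T t := by
  have hsT : s ∈ T := compF_subset_T T ht hs
  have hr : Reach T t s := (mem_compF T ht s).mp hs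
  ext u
  rw [mem_compF T hsT u, mem_compF T ht u]
  exact ⟨fun h => hr.trans h, fun h => (reach_symm T hT hr).trans h⟩

lemma fold_swap (T : Finset Int) (hT : ∀ x ∈ T, x ∈ interiorL) {t : Int} (ht : t ∈ T) :
    ∀ (q : List Int) (m : Int), ((compF T t).card : Int) ≤ m →
    q.foldl (fun m s => if s ∈ T \ compF T t then max m (((compF (T \ compF T t) s).card : Int)) else m) m
      = q.foldl (fun m s => if s ∈ T then max m (((compF T s).card : Int)) else m) m := by
  intro q
  induction q with
  | nil => intro m _; rfl
  | cons s q ih =>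
      intro m hm
      simp only [List.foldl_cons]
      by_cases hs : s ∈ T \ compF T t
      · rw [if_pos hs, if_pos (Finset.mem_sdiff.mp hs).1, comp_sdiff_eq T hT ht hs]
        exact ih _ (le_trans hm (le_max_left _ _))
      · by_cases hsT : s ∈ T
        · have hsc : s ∈ compF T t := by
            by_contra hc
            exact hs (Finset.mem_sdiff.mpr ⟨hsT, hc⟩)
          rw [if_neg hs, if_pos hsT, comp_eq_of_mem T hT ht hsc, max_eq_left hm]
          exact ih _ hm
        · rw [if_neg hs, if_neg hsT]
          exact ih _ hm

lemma card_le_64 (T : Finset Int) (hT : ∀ x ∈ T, x ∈ interiorL) : T.card ≤ 64 := by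
  have h1 : T ⊆ interiorL.toFinset := fun x hx => List.mem_toFinset.mpr (hT x hx)
  have h2 : interiorL.toFinset.card = 64 := by decide
  exact le_trans (Finset.card_le_card h1) (le_of_eq h2)

lemma outer_spec : ∀ (q : List Int) (tiles : PySem.Dict Int Int) (T : Finset Int) (largest : Int),
    (∀ k, tiles.getD k 0 ≠ 0 ↔ k ∈ T) → (∀ x ∈ T, x ∈ interiorL) →
    outerA tiles q largest = q.foldl (fun m s => if s ∈ T then max m (((compF T s).card : Int)) else m) largest := by
  intro q
  induction q with
  | nil => intro tiles T largest _ _; rfl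
  | cons t q ih =>
      intro tiles T largest hrel hint
      simp only [outerA, List.foldl_cons]
      by_cases htT : t ∈ T
      · rw [if_pos ((hrel t).mpr htT), if_pos htT]
        have hfuel : 7 * T.card + ([t] : List Int).length ≤ 2000 := by
          have := card_le_64 T hint
          simp only [List.length_cons, List.length_nil]
          omega
        obtain ⟨h1, h2⟩ := bfs_spec 2000 tiles T [t] 0 hrel hint hfuel
        have hRsingle : Rset T [t] = compF T t := by
          simp [Rset, htT]
        rw [hRsingle] at h1 h2
        rw [ih _ (T \ compF T t) _ h2 (fun x hx => hint x (Finset.sdiff_subset hx)), h1]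
        rw [zero_add]
        exact fold_swap T hint htT q (max largest _) (le_max_right _ _)
      · rw [if_neg (fun hne : tiles.getD t 0 ≠ 0 => htT ((hrel t).mp hne)), if_neg htT]
        exact ih tiles T largest hrel hint

-- ---- B-side: saturation loop computes components ----

lemma growB_toFinset (free comp : PySem.Set Int) :
    (growB free comp).toFinset = expandF free.toFinset comp.toFinset := by
  ext x
  simp only [growB, expandF, List.mem_toFinset, PySem.Set.mem_union, PySem.Set.mem_inter,
    PySem.Set.mem_ofList, List.mem_flatMap, Finset.mem_union, Finset.mem_biUnion,
    Finset.mem_inter]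
  tauto

lemma growB_nodup (free comp : PySem.Set Int) (h : comp.Nodup) : (growB free comp).Nodup :=
  PySem.Set.nodup_union _ _ h

lemma loopB_spec (free : PySem.Set Int) (t : Int) :
    ∀ (k : Nat) (comp : PySem.Set Int) (m : Nat), comp.Nodup →
    comp.toFinset = (expandF free.toFinset)^[m] {t} →
    ∃ m', (loopB free k comp).Nodup ∧
      (loopB free k comp).toFinset = (expandF free.toFinset)^[m'] {t} ∧
      (expandF free.toFinset ((loopB free k comp).toFinset) = (loopB free k comp).toFinset ∨ m' = m + k) := by
  intro k
  induction k with
  | zero =>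
      intro comp m hn hiter
      exact ⟨m, hn, hiter, Or.inr rfl⟩
  | succ k ih =>
      intro comp m hn hiter
      simp only [loopB]
      by_cases heq : PySem.Set.equal (growB free comp) comp = true
      · rw [if_pos heq]
        have hsame : (growB free comp).toFinset = comp.toFinset := by
          ext x
          simp only [List.mem_toFinset]
          exact (PySem.Set.equal_iff _ _).mp heq x
        refine ⟨m, hn, hiter, Or.inl ?_⟩
        calc expandF free.toFinset comp.toFinset
            = (growB free comp).toFinset := (growB_toFinset free comp).symm
          _ = comp.toFinset := hsame
      · rw [if_neg heq]
        obtain ⟨m', h1, h2, h3⟩ := ih (growB free comp) (m+1) (growB_nodup free comp hn)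
          (by rw [growB_toFinset, hiter]; exact (Function.iterate_succ_apply' _ _ _).symm)
        refine ⟨m', h1, h2, ?_⟩
        rcases h3 with h | h
        · exact Or.inl h
        · exact Or.inr (by omega)

lemma loopB_comp (free : PySem.Set Int) (hn : free.Nodup) {t : Int} (ht : t ∈ free) :
    PySem.Set.len (loopB free free.length (PySem.Set.ofList [t])) =
      ((compF free.toFinset t).card : Int) := by
  have htT : t ∈ free.toFinset := List.mem_toFinset.mpr ht
  have h0n : (PySem.Set.ofList [t] : PySem.Set Int).Nodup := PySem.Set.nodup_ofList _
  have h0f : (PySem.Set.ofList [t] : PySem.Set Int).toFinset = (expandF free.toFinset)^[0] ({t} : Finset Int) := by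
    ext x
    simp [PySem.Set.mem_ofList]
  obtain ⟨m', hRn, hRiter, hdisj⟩ := loopB_spec free t free.length (PySem.Set.ofList [t]) 0 h0n h0f
  have hcardlen : free.toFinset.card = free.length := List.toFinset_card_of_nodup hn
  have hRcomp : (loopB free free.length (PySem.Set.ofList [t])).toFinset = compF free.toFinset t := by
    rcases hdisj with hst | hm
    · ext u
      rw [stable_char free.toFinset htT hRiter hst u, mem_compF _ htT u]
    · rw [hRiter, hm]
      exact iterate_ge_card free.toFinset htT (by omega)
  have hlen : (loopB free free.length (PySem.Set.ofList [t])).length = (compF free.toFinset t).card := by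
    rw [← hRcomp, List.toFinset_card_of_nodup hRn]
  simp only [PySem.Set.len, hlen]

-- ---- max-fold facts ----

lemma foldl_max_cases (f : Int → Int) (l : List Int) (a : Int) :
    l.foldl (fun m s => max m (f s)) a = a ∨ ∃ x ∈ l, l.foldl (fun m s => max m (f s)) a = f x := by
  induction l generalizing a with
  | nil => exact Or.inl rfl
  | cons x l ih =>
      simp only [List.foldl_cons]
      rcases ih (max a (f x)) with h | ⟨y, hy, h⟩
      · rcases le_total (f x) a with hle | hle
        · exact Or.inl (h.trans (max_eq_left hle))
        · exact Or.inr ⟨x, List.mem_cons_self, h.trans (max_eq_right hle)⟩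
      · exact Or.inr ⟨y, List.mem_cons_of_mem x hy, h⟩

lemma foldl_max_ext (f : Int → Int) (l₁ l₂ : List Int) (h : ∀ x, x ∈ l₁ ↔ x ∈ l₂) (a : Int) :
    l₁.foldl (fun m s => max m (f s)) a = l₂.foldl (fun m s => max m (f s)) a := by
  obtain ⟨hb1, hb1'⟩ := PySem.List.le_foldl_max_int l₁ f a
  obtain ⟨hb2, hb2'⟩ := PySem.List.le_foldl_max_int l₂ f a
  apply le_antisymm
  · rcases foldl_max_cases f l₁ a with hc | ⟨x, hx, hc⟩
    · rw [hc]; exact hb2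
    · rw [hc]; exact hb2' x ((h x).mp hx)
  · rcases foldl_max_cases f l₂ a with hc | ⟨x, hx, hc⟩
    · rw [hc]; exact hb1
    · rw [hc]; exact hb1' x ((h x).mpr hx)

-- ---- the free set of a given input ----

def freeRaw (h_ls : List (List Int)) : List Int :=
  (PySem.List.pyRange 0 8 1).flatMap (fun i =>
    ((PySem.List.pyRange 0 8 1).filter (fun j => decide ([i, j] ∉ h_ls))).map (fun j => 10*i + j))

lemma mem_freeRaw (h_ls : List (List Int)) (k : Int) :
    k ∈ freeRaw h_ls ↔ ∃ i j : Int, 0 ≤ i ∧ i < 8 ∧ 0 ≤ j ∧ j < 8 ∧ [i, j] ∉ h_ls ∧ k = 10*i + j := by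
  simp only [freeRaw, List.mem_flatMap, List.mem_map, List.mem_filter,
    PySem.List.mem_pyRange_one, decide_eq_true_eq]
  constructor
  · rintro ⟨i, hi, j, ⟨⟨hj0, hj8⟩, hnin⟩, rfl⟩
    exact ⟨i, j, hi.1, hi.2, hj0, hj8, hnin, rfl⟩
  · rintro ⟨i, j, hi0, hi8, hj0, hj8, hnin, rfl⟩
    exact ⟨i, ⟨hi0, hi8⟩, j, ⟨⟨hj0, hj8⟩, hnin⟩, rfl⟩

lemma freeRaw_interior (h_ls : List (List Int)) {k : Int} (h : k ∈ freeRaw h_ls) : k ∈ interiorL := by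
  rcases (mem_freeRaw h_ls k).mp h with ⟨i, j, hi0, hi8, hj0, hj8, _, rfl⟩
  simp only [interiorL, List.mem_flatMap, List.mem_map, List.mem_range]
  exact ⟨i.toNat, by omega, j.toNat, by omega, by push_cast; omega⟩

-- the occupied list and tile-pair list of A, named for the proofs
def occL (h_ls : List (List Int)) : List (List Int) :=
  h_ls ++ ([(-1 : Int), 8].flatMap (fun i => (PySem.List.pyRange (-1) 9 1).map (fun j => [i, j])))
       ++ ((PySem.List.pyRange (-1) 9 1).flatMap (fun i => [(-1 : Int), 8].map (fun j => [i, j])))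

def pairsP : List (Int × Int) :=
  (PySem.List.pyRange (-1) 9 1).flatMap (fun i => (PySem.List.pyRange (-1) 9 1).map (fun j => (i, j)))

def tilesD (h_ls : List (List Int)) : PySem.Dict Int Int :=
  pairsP.foldl (fun d p => d.insert (10 * p.1 + p.2)
    (if [p.1, p.2] ∈ occL h_ls then 0 else 1)) PySem.Dict.empty

lemma A_eq (h_ls : List (List Int)) :
    find_largest_space h_ls =
      outerA (tilesD h_ls) ((tilesD h_ls).keys.filter (fun t => decide ((tilesD h_ls).getD t 0 ≠ 0))) 0 := rfl

lemma B_eq (h_ls : List (List Int)) :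
    find_largest_space_alt h_ls =
      (PySem.Set.ofList (freeRaw h_ls)).foldl (fun largest t => max largest
        (PySem.Set.len (loopB (PySem.Set.ofList (freeRaw h_ls))
          (PySem.Set.ofList (freeRaw h_ls)).length (PySem.Set.ofList [t])))) 0 := rfl

lemma mem_occL (h_ls : List (List Int)) (x : List Int) :
    x ∈ occL h_ls ↔ x ∈ h_ls ∨ (∃ i j : Int, (i = -1 ∨ i = 8) ∧ -1 ≤ j ∧ j < 9 ∧ x = [i, j])
      ∨ (∃ i j : Int, -1 ≤ i ∧ i < 9 ∧ (j = -1 ∨ j = 8) ∧ x = [i, j]) := by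
  simp only [occL, List.mem_append, List.mem_flatMap, List.mem_map,
    PySem.List.mem_pyRange_one, List.mem_cons, List.not_mem_nil, or_false]
  constructor
  · rintro ((h | ⟨i, hi, j, hj, rfl⟩) | ⟨i, hi, j, hj, rfl⟩)
    · exact Or.inl h
    · exact Or.inr (Or.inl ⟨i, j, hi, hj.1, hj.2, rfl⟩)
    · exact Or.inr (Or.inr ⟨i, j, hi.1, hi.2, hj, rfl⟩)
  · rintro (h | ⟨i, j, hi, hj1, hj2, rfl⟩ | ⟨i, j, hi1, hi2, hj, rfl⟩)
    · exact Or.inl (Or.inl h)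
    · exact Or.inl (Or.inr ⟨i, hi, j, ⟨hj1, hj2⟩, rfl⟩)
    · exact Or.inr ⟨i, ⟨hi1, hi2⟩, j, hj, rfl⟩

lemma mem_pairsP (p : Int × Int) :
    p ∈ pairsP ↔ -1 ≤ p.1 ∧ p.1 < 9 ∧ -1 ≤ p.2 ∧ p.2 < 9 := by
  simp only [pairsP, List.mem_flatMap, List.mem_map, PySem.List.mem_pyRange_one]
  constructor
  · rintro ⟨i, hi, j, hj, rfl⟩
    exact ⟨hi.1, hi.2, hj.1, hj.2⟩
  · rintro ⟨h1, h2, h3, h4⟩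
    exact ⟨p.1, ⟨h1, h2⟩, p.2, ⟨h3, h4⟩, rfl⟩

lemma pairsP_keys_nodup : (pairsP.map (fun p => 10 * p.1 + p.2)).Nodup := by decide

lemma tilesD_items (h_ls : List (List Int)) :
    (tilesD h_ls).items = pairsP.map (fun p => (10 * p.1 + p.2,
      if [p.1, p.2] ∈ occL h_ls then (0 : Int) else 1)) := by
  have h := PySem.Dict.items_foldl_insert_fresh pairsP (fun p => 10 * p.1 + p.2)
    (fun p => if [p.1, p.2] ∈ occL h_ls then (0 : Int) else 1) PySem.Dict.empty
    (fun a _ => by simp [PySem.Dict.contains_empty]) pairsP_keys_nodup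
  simpa [tilesD] using h

lemma tilesD_keys (h_ls : List (List Int)) :
    (tilesD h_ls).keys = pairsP.map (fun p => 10 * p.1 + p.2) := by
  show (tilesD h_ls).items.map (·.1) = _
  rw [tilesD_items, List.map_map]
  rfl

lemma tilesD_getD (h_ls : List (List Int)) (k : Int) :
    (tilesD h_ls).getD k 0 ≠ 0 ↔ k ∈ freeRaw h_ls := by
  by_cases hk : ∃ p ∈ pairsP, 10 * p.1 + p.2 = k
  · obtain ⟨p, hp, hpk⟩ := hk
    obtain ⟨hb1, hb2, hb3, hb4⟩ := (mem_pairsP p).mp hp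
    have hmemitem : (k, if [p.1, p.2] ∈ occL h_ls then (0 : Int) else 1) ∈ (tilesD h_ls).items := by
      rw [tilesD_items]
      exact List.mem_map.mpr ⟨p, hp, by rw [hpk]⟩
    have hknodup : (tilesD h_ls).keys.Nodup := by
      rw [tilesD_keys]; exact pairsP_keys_nodup
    rw [PySem.Dict.getD_of_mem_items _ hmemitem hknodup 0]
    by_cases hocc : [p.1, p.2] ∈ occL h_ls
    · simp only [if_pos hocc, ne_eq, not_true_eq_false, false_iff]
      intro hfree
      rcases (mem_freeRaw h_ls k).mp hfree with ⟨i, j, hi0, hi8, hj0, hj8, hnin, hk'⟩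
      have hij : i = p.1 ∧ j = p.2 := by constructor <;> omega
      rcases (mem_occL h_ls [p.1, p.2]).mp hocc with h | ⟨a, b, ha, _, _, heq⟩ | ⟨a, b, _, _, hb, heq⟩
      · exact hnin (by rw [hij.1, hij.2]; exact h)
      · simp only [List.cons.injEq, and_true] at heq
        omega
      · simp only [List.cons.injEq, and_true] at heq
        omega
    · simp only [if_neg hocc, ne_eq, one_ne_zero, not_false_eq_true, true_iff]
      have hnin : [p.1, p.2] ∉ h_ls := fun h => hocc ((mem_occL h_ls _).mpr (Or.inl h))
      have hnb1 : ¬ (p.1 = -1 ∨ p.1 = 8) := by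
        intro h
        exact hocc ((mem_occL h_ls _).mpr (Or.inr (Or.inl ⟨p.1, p.2, h, hb3, hb4, rfl⟩)))
      have hnb2 : ¬ (p.2 = -1 ∨ p.2 = 8) := by
        intro h
        exact hocc ((mem_occL h_ls _).mpr (Or.inr (Or.inr ⟨p.1, p.2, hb1, hb2, h, rfl⟩)))
      exact (mem_freeRaw h_ls k).mpr ⟨p.1, p.2, by omega, by omega, by omega, by omega, hnin, hpk.symm⟩
  · have hnkey : ¬ (tilesD h_ls).contains k = true := by
      rw [PySem.Dict.contains_iff_mem_keys, tilesD_keys]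
      intro hmem
      rcases List.mem_map.mp hmem with ⟨p, hp, hpk⟩
      exact hk ⟨p, hp, hpk⟩
    rw [PySem.Dict.getD_of_not_contains _ 0 (by simpa using hnkey)]
    simp only [ne_eq, not_true_eq_false, false_iff]
    intro hfree
    rcases (mem_freeRaw h_ls k).mp hfree with ⟨i, j, hi0, hi8, hj0, hj8, _, rfl⟩
    exact hk ⟨(i, j), (mem_pairsP (i, j)).mpr ⟨by omega, by omega, by omega, by omega⟩, rfl⟩

-- ---- final assembly ----

-- ===== VERDICT (by name: the statement is the Claim_ definition above) =====
theorem find_largest_space_spec : Claim_equal_find_largest_space := by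
  unfold Claim_equal_find_largest_space
  intro h_ls _
  unfold Spec_find_largest_space
  rw [A_eq, B_eq]
  have hSnodup : (PySem.Set.ofList (freeRaw h_ls)).Nodup := PySem.Set.nodup_ofList _
  have hmemS : ∀ x : Int, x ∈ PySem.Set.ofList (freeRaw h_ls) ↔ x ∈ freeRaw h_ls :=
    fun x => PySem.Set.mem_ofList _ x
  have hmemT : ∀ x : Int, x ∈ (PySem.Set.ofList (freeRaw h_ls)).toFinset ↔ x ∈ freeRaw h_ls :=
    fun x => by rw [List.mem_toFinset]; exact hmemS x
  have hint : ∀ x ∈ (PySem.Set.ofList (freeRaw h_ls)).toFinset, x ∈ interiorL :=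
    fun x hx => freeRaw_interior h_ls ((hmemT x).mp hx)
  have hrel : ∀ k, (tilesD h_ls).getD k 0 ≠ 0 ↔ k ∈ (PySem.Set.ofList (freeRaw h_ls)).toFinset :=
    fun k => (tilesD_getD h_ls k).trans (hmemT k).symm
  -- A-side
  rw [outer_spec _ (tilesD h_ls) _ 0 hrel hint]
  have hq1 : ∀ x : Int, x ∈ (tilesD h_ls).keys.filter (fun t => decide ((tilesD h_ls).getD t 0 ≠ 0))
      ↔ x ∈ (PySem.Set.ofList (freeRaw h_ls)).toFinset := by
    intro x
    rw [List.mem_filter]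
    constructor
    · rintro ⟨_, hx⟩
      exact (hrel x).mp (by simpa using hx)
    · intro hx
      refine ⟨?_, by simpa using (hrel x).mpr hx⟩
      rw [tilesD_keys]
      have := (hmemT x).mp hx
      rcases (mem_freeRaw h_ls x).mp this with ⟨i, j, hi0, hi8, hj0, hj8, _, rfl⟩
      exact List.mem_map.mpr ⟨(i, j), (mem_pairsP (i, j)).mpr ⟨by omega, by omega, by omega, by omega⟩, rfl⟩
  rw [PySem.List.foldl_congr_mem _
    (fun m s => if s ∈ (PySem.Set.ofList (freeRaw h_ls)).toFinset then max m (((compF (PySem.Set.ofList (freeRaw h_ls)).toFinset s).card : Int)) else m)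
    (fun m s => max m (((compF (PySem.Set.ofList (freeRaw h_ls)).toFinset s).card : Int))) 0
    (fun acc x hx => if_pos ((hq1 x).mp hx))]
  -- B-side
  rw [PySem.List.foldl_congr_mem _
    (fun largest t => max largest (PySem.Set.len (loopB (PySem.Set.ofList (freeRaw h_ls))
      (PySem.Set.ofList (freeRaw h_ls)).length (PySem.Set.ofList [t]))))
    (fun largest t => max largest (((compF (PySem.Set.ofList (freeRaw h_ls)).toFinset t).card : Int))) 0
    (fun acc x hx => by beta_reduce; rw [loopB_comp _ hSnodup hx])]
  exact foldl_max_ext _ _ _ (fun x => (hq1 x).trans ((hmemT x).trans (hmemS x).symm)) 0
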